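-- pv_equiv track=rewrite | github.com/tom-brash/advent-of-code | 2019/day16/16-2.py | execute_phase
-- ===== SOURCE A (Python) =====
-- def execute_phase(signal):
--     updated_signal = []
--     total = sum(signal)
--     for i in range(len(signal)):
--         new_val = total % 10
--         updated_signal.append(new_val)
--         total -= signal[i]
--     return updated_signal
-- ===== SOURCE B (Python) =====
-- def execute_phase(sig):
--     result = [0] * len(sig)
--     running = 0
--     for i in range(len(sig) - 1, -1, -1):
--         running += sig[i]
--         result[i] = running % 10
--     return result
-- ===== Notes on version B (the rewrite author's own statement) =====
-- stated objective: alternative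
-- what changed: B fills a preallocated result back-to-front while accumulating the suffix sum directly, instead of computing sum(signal) first and subtracting prefix elements while appending front-to-back.
import Mathlib
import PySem

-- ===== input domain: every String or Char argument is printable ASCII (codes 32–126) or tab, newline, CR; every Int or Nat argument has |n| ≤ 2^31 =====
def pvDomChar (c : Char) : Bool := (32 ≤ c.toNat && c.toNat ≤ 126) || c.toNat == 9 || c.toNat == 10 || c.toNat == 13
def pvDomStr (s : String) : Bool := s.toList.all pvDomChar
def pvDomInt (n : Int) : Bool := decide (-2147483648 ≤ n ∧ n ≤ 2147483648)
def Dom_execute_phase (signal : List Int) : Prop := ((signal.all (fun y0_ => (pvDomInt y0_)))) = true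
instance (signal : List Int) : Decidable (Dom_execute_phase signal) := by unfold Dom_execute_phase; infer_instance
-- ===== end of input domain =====

-- B fills the output back-to-front while accumulating the suffix sum directly,
-- instead of A's sum-then-subtract prefix sweep; same cost, different decomposition.

-- ===== PORT A =====
-- total = sum(signal); for i in range(len(signal)): append total % 10; total -= signal[i]
def execute_phase (signal : List Int) : List Int :=
  let total : Int := signal.foldl (· + ·) 0
  ((PySem.List.pyRange 0 (signal.length : Int) 1).foldl
    (fun (st : List Int × Int) i =>
      (st.1 ++ [PySem.Int.mod st.2 10], st.2 - PySem.List.pyGetD signal i 0))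
    ([], total)).1

-- ===== PORT B =====
-- reverse traversal: running += signal[i]; result[i] = running % 10 — as structural
-- recursion from the right, building each result cell from its suffix running sum.
def execute_phase_altGo : List Int → Int × List Int
  | [] => (0, [])
  | x :: xs =>
    let p := execute_phase_altGo xs
    (p.1 + x, PySem.Int.mod (p.1 + x) 10 :: p.2)

def execute_phase_alt (signal : List Int) : List Int :=
  (execute_phase_altGo signal).2

-- ===== PRECONDITION & SPEC =====
def Spec_execute_phase (signal : List Int) (out : List Int) : Prop := out = execute_phase_alt signal
instance (signal : List Int) (out : List Int) : Decidable (Spec_execute_phase signal out) := by unfold Spec_execute_phase; infer_instance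

-- ===== CLAIM (what is proved, stated in full; the proofs are below) =====
def Claim_equal_execute_phase : Prop := ∀ (signal : List Int), Dom_execute_phase signal → Spec_execute_phase signal (execute_phase signal)

-- ===== LEMMAS AND PROOFS =====

theorem altGo_fst (signal : List Int) (i : Int) :
    signal.foldl (· + ·) i = i + (execute_phase_altGo signal).1 := by
  induction signal generalizing i with
  | nil => simp [execute_phase_altGo]
  | cons x xs ih => simp [execute_phase_altGo, List.foldl_cons, ih (i + x)]; ring

theorem foldl_step_eq (signal : List Int) (acc : List Int) :
    (signal.foldl
      (fun (st : List Int × Int) x => (st.1 ++ [PySem.Int.mod st.2 10], st.2 - x))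
      (acc, (execute_phase_altGo signal).1)).1 = acc ++ (execute_phase_altGo signal).2 := by
  induction signal generalizing acc with
  | nil => simp [execute_phase_altGo]
  | cons x xs ih =>
    simp only [execute_phase_altGo, List.foldl_cons]
    have h : (execute_phase_altGo xs).1 + x - x = (execute_phase_altGo xs).1 := by ring
    simp only [h]
    rw [ih (acc ++ [PySem.Int.mod ((execute_phase_altGo xs).1 + x) 10])]
    simp

-- ===== VERDICT (by name: the statement is the Claim_ definition above) =====
theorem execute_phase_spec : Claim_equal_execute_phase := by
  intro signal _
  unfold Spec_execute_phase execute_phase execute_phase_alt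
  show ((PySem.List.pyRange 0 (signal.length : Int) 1).foldl
      (fun (st : List Int × Int) i =>
        (st.1 ++ [PySem.Int.mod st.2 10], st.2 - PySem.List.pyGetD signal i 0))
      ([], signal.foldl (· + ·) 0)).1 = (execute_phase_altGo signal).2
  rw [PySem.List.foldl_pyRange_zero_pyGetD' signal 0
    (fun (st : List Int × Int) x => (st.1 ++ [PySem.Int.mod st.2 10], st.2 - x)) _]
  have h : signal.foldl (· + ·) 0 = (execute_phase_altGo signal).1 := by
    simpa using altGo_fst signal 0
  rw [h, foldl_step_eq signal []]
  simp
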